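-- pv_equiv track=rewrite | github.com/jackfischer/hackerrank | algorithms/strings/twocharacters.py | legal
-- ===== SOURCE A (Python) =====
-- def legal(original: list, selected: tuple) -> bool:
--     string = [c for c in original if c in selected]
--     a = string[0]
--     b = string[1]
--     #Ensure alternation
--     for i in range(2, len(string)):
--         if i % 2 == 0:
--             if string[i] != a:
--                 return False
--         else:
--             if string[i] != b:
--                 return False
--     return True
-- ===== SOURCE B (Python) =====
-- def legal(original: list, selected: tuple) -> bool:
--     string = [c for c in original if c in selected]
--     a = string[0]
--     b = string[1]
--     # alternation <=> even positions are all a and odd positions are all b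
--     return all(c == a for c in string[::2]) and all(c == b for c in string[1::2])
-- ===== Notes on version B (the rewrite author's own statement) =====
-- stated objective: alternative
-- what changed: Replaces the single indexed loop that branches on i % 2 by two position-partitioned homogeneity checks over the strided slices string[::2] and string[1::2].
import Mathlib
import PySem

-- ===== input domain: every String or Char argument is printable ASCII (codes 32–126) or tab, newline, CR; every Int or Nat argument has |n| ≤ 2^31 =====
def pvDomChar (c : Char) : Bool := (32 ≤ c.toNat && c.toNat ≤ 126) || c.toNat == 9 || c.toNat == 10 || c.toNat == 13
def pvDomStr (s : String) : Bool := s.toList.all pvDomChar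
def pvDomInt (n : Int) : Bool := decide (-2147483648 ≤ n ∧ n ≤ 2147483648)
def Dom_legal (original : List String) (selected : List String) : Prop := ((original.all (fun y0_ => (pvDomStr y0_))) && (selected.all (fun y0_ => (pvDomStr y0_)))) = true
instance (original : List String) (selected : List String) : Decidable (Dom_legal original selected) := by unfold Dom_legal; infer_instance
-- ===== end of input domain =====

-- B replaces A's parity-branching index loop by two strided homogeneity checks: all of string[::2] equals
-- string[0] and all of string[1::2] equals string[1] (alternative decomposition; same cost).

-- ===== PORT A =====
def legal (original : List String) (selected : List String) : Bool :=
  let string := original.filter (fun c => selected.contains c)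
  match PySem.List.pyGet? string 0, PySem.List.pyGet? string 1 with
  | some a, some b =>
      -- for i in range(2, len(string)): early return False on mismatch ≡ .all
      (PySem.List.pyRange 2 (string.length : Int) 1).all (fun i =>
        if PySem.Int.mod i 2 == 0 then PySem.List.pyGetD string i "" == a
        else PySem.List.pyGetD string i "" == b)
  | _, _ => false   -- IndexError in Python; excluded by Pre_legal

-- ===== PORT B =====
def legal_alt (original : List String) (selected : List String) : Bool :=
  let string := original.filter (fun c => selected.contains c)
  match PySem.List.pyGet? string 0 with
  | none => false   -- IndexError in Python (string[0]); excluded by Pre_legal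
  | some a =>
    match PySem.List.pyGet? string 1 with
    | none => false   -- IndexError in Python (string[1]); excluded by Pre_legal
    | some b =>
        ((PySem.List.slice? string none none 2).getD []).all (fun c => c == a) &&
        ((PySem.List.slice? string (some 1) none 2).getD []).all (fun c => c == b)

-- ===== PRECONDITION & SPEC =====
-- A indexes string[0] and string[1]: Pre_ excludes exactly the inputs where fewer than two elements
-- survive the filter, on which A (and B, at the same subscripts) raises IndexError.
def Pre_legal (original : List String) (selected : List String) : Prop :=
  2 ≤ (original.filter (fun c => selected.contains c)).length
instance (original : List String) (selected : List String) : Decidable (Pre_legal original selected) := by unfold Pre_legal; infer_instance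
def pvWitness_legal : List String × List String := (["a", "b", "a"], ["a", "b"])

def Spec_legal (original : List String) (selected : List String) (out : Bool) : Prop := out = legal_alt original selected
instance (original : List String) (selected : List String) (out : Bool) : Decidable (Spec_legal original selected out) := by unfold Spec_legal; infer_instance

-- ===== CLAIM (what is proved, stated in full; the proofs are below) =====
def Claim_equal_legal : Prop := ∀ (original : List String) (selected : List String), Dom_legal original selected → Pre_legal original selected → Spec_legal original selected (legal original selected)

-- ===== LEMMAS AND PROOFS =====

/-- alternation spec: l[0] = a, l[1] = b, l[2] = a, … -/
def altMatch (a b : String) : List String → Bool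
  | [] => true
  | c :: cs => (c == a) && altMatch b a cs

theorem aSide (a b : String) (rest : List String) :
    (List.range rest.length).all
        (fun k => if (k : Nat) % 2 == 0 then rest.getD k "" == a else rest.getD k "" == b)
      = altMatch a b rest := by
  induction rest generalizing a b with
  | nil => rfl
  | cons c cs ih =>
      simp only [List.length_cons, List.range_succ_eq_map, List.all_cons, List.all_map]
      simp only [altMatch]
      have h0 : (if (0:Nat) % 2 == 0 then (c :: cs).getD 0 "" == a else (c :: cs).getD 0 "" == b) = (c == a) := by
        simp [List.getD]
      rw [h0]
      have h1 : ∀ (k : Nat),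
          ((fun k => if (k:Nat) % 2 == 0 then (c :: cs).getD k "" == a else (c :: cs).getD k "" == b) ∘ Nat.succ) k
          = (fun k => if (k:Nat) % 2 == 0 then cs.getD k "" == b else cs.getD k "" == a) k := by
        intro k
        simp only [Function.comp_apply, Nat.succ_eq_add_one]
        by_cases hk : k % 2 = 0
        · have h2 : (k + 1) % 2 = 1 := by omega
          simp [List.getD, h2, hk]
        · have h2 : (k + 1) % 2 = 0 := by omega
          simp [List.getD, h2, hk]
      rw [List.all_congr rfl h1, ih b a]

def everyOther : List String → List String
  | [] => []
  | [a] => [a]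
  | a :: _ :: t => a :: everyOther t

theorem core (xs : List String) :
    (List.range ((xs.length + 1) / 2)).filterMap (fun k => xs[2 * k]?) = everyOther xs := by
  induction xs using everyOther.induct with
  | case1 => rfl
  | case2 a => simp [everyOther]
  | case3 a b t ih =>
      have hl : ((a :: b :: t).length + 1) / 2 = (t.length + 1) / 2 + 1 := by
        simp [List.length_cons]; omega
      rw [hl, List.range_succ_eq_map, List.filterMap_cons, List.filterMap_map]
      simp only [Nat.mul_zero, List.getElem?_cons_zero]
      rw [show everyOther (a :: b :: t) = a :: everyOther t from rfl]
      congr 1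

theorem sliceE (xs : List String) : PySem.List.slice? xs none none 2 = some (everyOther xs) := by
  rw [← core]
  simp only [PySem.List.slice?, PySem.List.sliceIndices]
  norm_num
  have hc : (if 0 < xs.length then (((xs.length : Int) + 2 - 1) / 2).toNat else 0) = (xs.length + 1) / 2 := by
    split_ifs with h
    · omega
    · omega
  rw [hc]
  apply List.filterMap_congr
  intro k _
  have h1 : ((2 * (k : Int)).toNat) = 2 * k := by omega
  rw [h1]

theorem sliceO (xs : List String) : PySem.List.slice? xs (some 1) none 2 = some (everyOther xs.tail) := by
  cases xs with
  | nil => rfl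
  | cons a t =>
      simp only [PySem.List.slice?, PySem.List.sliceIndices]
      norm_num
      rw [← core t]
      have hc : (if 0 < t.length then (((t.length : Int) + 2 - 1) / 2).toNat else 0) = (t.length + 1) / 2 := by
        split_ifs with h
        · omega
        · omega
      rw [hc]
      apply List.filterMap_congr
      intro k _
      have h1 : ((1 + 2 * (k : Int)).toNat) = 2 * k + 1 := by omega
      rw [h1]
      simp

theorem tailEO (x : String) (t : List String) : everyOther (x :: t) = x :: everyOther t.tail := by
  cases t <;> rfl

theorem strideEO (rest : List String) (a b : String) :
    ((everyOther rest).all (fun c => c == a) && (everyOther rest.tail).all (fun c => c == b)) = altMatch a b rest := by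
  induction rest using everyOther.induct with
  | case1 => rfl
  | case2 c => simp [everyOther, altMatch]
  | case3 c d t ih =>
      rw [show everyOther (c :: d :: t) = c :: everyOther t from rfl]
      rw [show (c :: d :: t).tail = d :: t from rfl, tailEO d t]
      simp only [List.all_cons, altMatch]
      cases hca : (c == a) <;> cases hdb : (d == b) <;> simp [← ih]

theorem loop_eq_range (a b : String) (rest : List String) :
    ((PySem.List.pyRange 2 ((a :: b :: rest).length : Int) 1).all (fun i =>
        if PySem.Int.mod i 2 == 0 then PySem.List.pyGetD (a :: b :: rest) i "" == a
        else PySem.List.pyGetD (a :: b :: rest) i "" == b))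
    = (List.range rest.length).all
        (fun k => if (k : Nat) % 2 == 0 then rest.getD k "" == a else rest.getD k "" == b) := by
  rw [PySem.List.pyRange_one]
  have hn : (((a :: b :: rest).length : Int) - 2).toNat = rest.length := by
    simp; omega
  rw [hn, List.all_map]
  refine List.all_congr rfl ?_
  intro k
  simp only [Function.comp_apply]
  have hmod : PySem.Int.mod (2 + (k : Int)) 2 = ((k % 2 : Nat) : Int) := by
    simp [PySem.Int.mod, Int.fmod_eq_emod]
  have hget : PySem.List.pyGetD (a :: b :: rest) (2 + (k : Int)) "" = rest.getD k "" := by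
    rw [PySem.List.pyGetD_of_nonneg _ _ (by omega)]
    have h2 : ((2 : Int) + k).toNat = k + 2 := by omega
    simp [h2, List.getD]
  rw [hmod, hget]
  by_cases hk : k % 2 = 0
  · simp only [hk]; norm_num
  · have h1 : k % 2 = 1 := by omega
    simp only [h1]; norm_num

-- ===== VERDICT (by name: the statement is the Claim_ definition above) =====
theorem legal_spec : Claim_equal_legal := by
  intro original selected _hdom hpre
  unfold Spec_legal legal legal_alt
  set string := original.filter (fun c => selected.contains c) with hs
  unfold Pre_legal at hpre
  rw [← hs] at hpre
  obtain ⟨a, b, rest, h1⟩ : ∃ a b t, string = a :: b :: t := by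
    match string, hpre with
    | a :: b :: t, _ => exact ⟨a, b, t, rfl⟩
  rw [h1]
  have hnn : (0:Int) ≤ (rest.length : Int) + 1 := by positivity
  have hg0 : PySem.List.pyGet? (a :: b :: rest) (0 : Int) = some a := by
    simp [PySem.List.pyGet?, PySem.List.pyIdx?, hnn]
  have hg1 : PySem.List.pyGet? (a :: b :: rest) (1 : Int) = some b := by
    simp [PySem.List.pyGet?, PySem.List.pyIdx?]
  simp only [hg0, hg1]
  rw [loop_eq_range, aSide]
  rw [sliceE, sliceO]
  simp only [Option.getD_some]
  rw [show everyOther (a :: b :: rest) = a :: everyOther rest from rfl]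
  rw [show (a :: b :: rest).tail = b :: rest from rfl, tailEO b rest]
  simp only [List.all_cons, beq_self_eq_true, Bool.true_and]
  rw [strideEO]
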